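-- pv_equiv track=rewrite | github.com/justzino/algorithms | Programmers/2021-Kakao-Blind-Recruitment/1.py | solution
-- ===== SOURCE A (Python) =====
-- available_list = ['-', '_', '.']
--
-- def solution(new_id):
--     answer = ''
--
--     # 1단계
--     tmp = new_id.lower()
--     # 2단계
--     for c in tmp:
--         if c.islower() or c.isdigit() or c in available_list:
--             answer += c
--         else:
--             continue
--
--     # 3단계
--     while answer.find("..") != -1:
--         answer = answer.replace("..", '.')
--
--         # 4, 5단계
--     try:
--         while answer[0] == ".":
--             answer = answer[1:]
--     except:
--         answer += "a"
--     try: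
--         while answer[-1] == ".":
--             answer = answer[:-1]
--     except:
--         answer += "a"
--
--     # 6단계
--     if len(answer) >= 16:
--         answer = answer[:15]
--     if answer[-1] == ".":
--         answer = answer[:-1]
--
--     # 7단계
--     while len(answer) <= 2:
--         answer += answer[-1]
--
--     return answer
-- ===== SOURCE B (Python) =====
-- # B: single left-to-right scan that filters and merges consecutive dots at once,
-- # then strip('.'), one truncation, and a closed-form pad instead of A's
-- # filter loop + repeated replace + two try/while strip loops + pad loop.
-- def solution(new_id):
--     res = []
--     for c in new_id.lower():
--         if c.islower() or c.isdigit() or c in "-_.":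
--             if c == '.' and res and res[-1] == '.':
--                 continue
--             res.append(c)
--     s = ''.join(res).strip('.')
--     if not s:
--         s = 'a'
--     s = s[:15]
--     if s.endswith('.'):
--         s = s[:-1]
--     s += s[-1] * (3 - len(s))
--     return s
-- ===== Notes on version B (the rewrite author's own statement) =====
-- stated objective: simpler
-- what changed: B folds A's separate filter loop, repeated dot-collapsing replace loop, two try/while dot-stripping loops and char-by-char pad loop into one scan that filters and merges consecutive dots at once, followed by a two-sided strip, one truncation and a closed-form pad.
import Mathlib
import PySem

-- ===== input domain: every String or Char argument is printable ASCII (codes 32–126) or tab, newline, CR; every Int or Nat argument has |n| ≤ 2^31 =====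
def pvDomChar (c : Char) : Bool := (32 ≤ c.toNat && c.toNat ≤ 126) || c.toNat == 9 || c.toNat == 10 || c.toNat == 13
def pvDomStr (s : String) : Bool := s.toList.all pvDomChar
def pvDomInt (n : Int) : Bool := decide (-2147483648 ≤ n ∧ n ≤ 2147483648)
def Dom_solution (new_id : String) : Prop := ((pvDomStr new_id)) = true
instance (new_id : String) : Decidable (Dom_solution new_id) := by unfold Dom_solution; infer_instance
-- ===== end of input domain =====

-- B folds A's filter pass and repeated ".."-replace into one scan, replaces A's two
-- try/while dot-strip loops by strip('.'), and pads by a closed form (objective: simpler).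

-- ===== PORT A =====

-- `c.islower() or c.isdigit() or c in available_list`
def keepA (c : Char) : Bool :=
  PySem.Chars.islower c || PySem.Chars.isdigit c || ['-', '_', '.'].contains c

-- `rep` and the lemmas up to `rep_length_lt` exist only to justify termination of
-- `collapseA` (replacing ".." by "." strictly shortens a string containing "..");
-- `collapseA` cites them by name in `decreasing_by`.
def rep : List Char → List Char
  | [] => []
  | [c] => [c]
  | a :: b :: t => if a = '.' ∧ b = '.' then '.' :: rep t else a :: rep (b :: t)

theorem go_rep (fuel : Nat) (l acc : List Char) (h : l.length ≤ fuel) :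
    PySem.Chars.replace.go ['.', '.'] ['.'] fuel l acc = acc.reverse ++ rep l := by
  induction fuel generalizing l acc with
  | zero =>
    have : l = [] := by cases l <;> simp_all
    subst this; simp [PySem.Chars.replace.go, rep]
  | succ n ih =>
    match l with
    | [] => simp [PySem.Chars.replace.go, rep]
    | [c] =>
      rw [PySem.Chars.replace.go]
      have hp : List.isPrefixOf ['.', '.'] [c] = false := by simp [List.isPrefixOf]
      simp only [hp, Bool.false_eq_true, reduceIte]
      rw [ih [] (c :: acc) (by simp)]
      simp [rep]
    | a :: b :: t =>
      rw [PySem.Chars.replace.go]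
      by_cases hab : a = '.' ∧ b = '.'
      · obtain ⟨rfl, rfl⟩ := hab
        have hp : List.isPrefixOf ['.', '.'] ('.' :: '.' :: t) = true := by
          simp [List.isPrefixOf]
        simp only [hp, reduceIte, List.length_cons, List.drop_succ_cons, List.length_nil,
          List.drop_zero, List.reverse_cons, List.reverse_nil, List.nil_append]
        rw [show ['.'] ++ acc = '.' :: acc from rfl, ih t ('.' :: acc) (by simp at h ⊢; omega)]
        simp [rep]
      · have hp : List.isPrefixOf ['.', '.'] (a :: b :: t) = false := by
          show (('.' == a) && (('.' == b) && true)) = false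
          simp only [Bool.and_true, Bool.and_eq_false_iff, beq_eq_false_iff_ne, ne_eq]
          by_cases ha : a = '.'
          · subst ha; right; intro hb; exact hab ⟨rfl, hb.symm⟩
          · left; intro hc; exact ha hc.symm
        simp only [hp, Bool.false_eq_true, reduceIte]
        rw [ih (b :: t) (a :: acc) (by simp at h ⊢; omega)]
        rw [rep, if_neg hab]; simp

theorem replace_dotdot_eq_rep (s : List Char) :
    PySem.Chars.replace s ['.', '.'] ['.'] = rep s := by
  rw [PySem.Chars.replace]
  simp [go_rep s.length s [] le_rfl]

theorem rep_length_le (s : List Char) : (rep s).length ≤ s.length := by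
  fun_induction rep <;> simp_all <;> omega

theorem rep_length_lt {s : List Char} (h : ['.', '.'] <:+: s) :
    (rep s).length < s.length := by
  fun_induction rep with
  | case1 => simp at h
  | case2 c =>
    exfalso
    rcases h with ⟨u, v, huv⟩
    have := congrArg List.length huv; simp at this; omega
  | case3 a b t hab ih => simp; have := rep_length_le t; omega
  | case4 a b t hab ih =>
    have : ['.', '.'] <:+: (b :: t) := by
      rcases (List.infix_cons_iff).mp h with hpre | hinf
      · exfalso
        rcases hpre with ⟨w, hw⟩
        cases hw
        exact hab ⟨rfl, rfl⟩
      · exact hinf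
    have := ih this
    simpa using Nat.succ_lt_succ this

-- 3단계: `while answer.find("..") != -1: answer = answer.replace("..", ".")`
def collapseA (s : List Char) : List Char :=
  if h : PySem.Chars.find s ['.', '.'] ≠ -1 then
    collapseA (PySem.Chars.replace s ['.', '.'] ['.'])
  else s
termination_by s.length
decreasing_by
  rw [replace_dotdot_eq_rep]
  exact rep_length_lt ((PySem.Chars.find_ne_neg_one_iff s ['.', '.']).mp h)

-- 4단계: `try: while answer[0] == ".": answer = answer[1:] except: answer += "a"`
-- (the except fires exactly when `answer[0]` raises IndexError, i.e. on []).
def stripLeadA : List Char → List Char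
  | [] => ['a']
  | c :: cs => if c = '.' then stripLeadA cs else c :: cs

-- 5단계: `try: while answer[-1] == ".": answer = answer[:-1] except: answer += "a"`
def stripTrailA (l : List Char) : List Char :=
  match h : PySem.List.pyGet? l (-1) with
  | some c =>
      if c = '.' then stripTrailA (PySem.List.slice l none (some (-1))) else l
  | none => l ++ ['a']
termination_by l.length
decreasing_by
  rw [PySem.List.slice_to_neg_one]
  rw [PySem.List.pyGet?_neg_one] at h
  have : l ≠ [] := by intro hn; subst hn; simp at h
  simpa [List.length_dropLast] using Nat.sub_lt (List.length_pos_of_ne_nil this) one_pos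

-- 7단계: `while len(answer) <= 2: answer += answer[-1]`
-- (`none` is unreachable from `solution`: there the list is nonempty; Python would raise).
def padA (l : List Char) : List Char :=
  if _h : l.length ≤ 2 then
    match PySem.List.pyGet? l (-1) with
    | some c => padA (l ++ [c])
    | none => l
  else l
termination_by 3 - l.length

def solution (new_id : String) : String :=
  -- 1단계
  let tmp := (PySem.Str.lower new_id).toList
  -- 2단계
  let answer := tmp.foldl (fun ans c => if keepA c then ans ++ [c] else ans) ([] : List Char)
  -- 3단계
  let answer := collapseA answer
  -- 4, 5단계
  let answer := stripTrailA (stripLeadA answer)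
  -- 6단계
  let answer := if answer.length ≥ 16 then PySem.List.slice answer none (some 15) else answer
  let answer :=
    match PySem.List.pyGet? answer (-1) with
    | some c => if c = '.' then PySem.List.slice answer none (some (-1)) else answer
    | none => answer  -- unreachable here: answer ≠ [] (Python would raise IndexError)
  -- 7단계
  String.mk (padA answer)

-- ===== PORT B =====

-- `c.islower() or c.isdigit() or c in "-_."`
def keepB (c : Char) : Bool :=
  PySem.Chars.islower c || PySem.Chars.isdigit c || PySem.Chars.isIn [c] ['-', '_', '.']

def solution_alt (new_id : String) : String :=
  -- one pass: keep the char, but skip a '.' when the last kept char is already '.'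
  -- (`res and res[-1] == '.'` is exactly `acc.getLast? == some '.'`)
  let res := (PySem.Str.lower new_id).toList.foldl
    (fun acc c =>
      if keepB c then
        if c == '.' && acc.getLast? == some '.' then acc else acc ++ [c]
      else acc) ([] : List Char)
  -- s = ''.join(res).strip('.');  if not s: s = 'a'
  let s := PySem.Chars.stripChars res ['.']
  let s := if s = [] then ['a'] else s
  -- s = s[:15];  if s.endswith('.'): s = s[:-1]
  let s := PySem.List.slice s none (some 15)
  let s := if PySem.Chars.endswith s ['.'] then PySem.List.slice s none (some (-1)) else s
  -- s += s[-1] * (3 - len(s))  — Nat subtraction clamps at 0 exactly as Python's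
  -- negative string repeat gives ''; `none` is unreachable here: s ≠ [].
  let s :=
    match PySem.List.pyGet? s (-1) with
    | some c => s ++ List.replicate (3 - s.length) c
    | none => s
  String.mk s

-- ===== PRECONDITION & SPEC =====
def Spec_solution (new_id : String) (out : String) : Prop := out = solution_alt new_id
instance (new_id : String) (out : String) : Decidable (Spec_solution new_id out) := by unfold Spec_solution; infer_instance

-- ===== CLAIM (what is proved, stated in full; the proofs are below) =====
def Claim_equal_solution : Prop := ∀ (new_id : String), Dom_solution new_id → Spec_solution new_id (solution new_id)

-- ===== LEMMAS AND PROOFS =====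


def md (p : Option Char) : List Char → List Char
  | [] => []
  | c :: t => if c == '.' && p == some '.' then md p t else c :: md (some c) t

theorem bfold_eq (m : List Char) (acc : List Char) :
    m.foldl (fun acc c => if c == '.' && acc.getLast? == some '.' then acc else acc ++ [c]) acc
      = acc ++ md acc.getLast? m := by
  induction m generalizing acc with
  | nil => simp [md]
  | cons c t ih =>
    rw [List.foldl_cons, md]
    by_cases hc : (c == '.' && acc.getLast? == some '.') = true
    · rw [if_pos hc, if_pos hc, ih]
    · rw [if_neg hc, if_neg hc, ih]
      simp [List.getLast?_append]

theorem md_rep (l : List Char) (p : Option Char) : md p (rep l) = md p l := by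
  fun_induction rep generalizing p with
  | case1 => rfl
  | case2 c => rfl
  | case3 a b t hab ih =>
    obtain ⟨rfl, rfl⟩ := hab
    rw [md, md, md]
    by_cases hp : p = some '.'
    · subst hp; simp [ih]
    · have : (('.' : Char) == '.' && p == some '.') = false := by
        simp [hp]
      rw [this]
      simp only [Bool.false_eq_true, reduceIte]
      rw [md]
      simp [ih]
  | case4 a b t hab ih =>
    rw [md, md]
    by_cases hc : (a == '.' && p == some '.') = true
    · rw [if_pos hc, if_pos hc, ih]
    · rw [if_neg hc, if_neg hc, ih]

theorem md_of_no_dotdot_aux (t : List Char) (c : Char)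
    (h : ¬ ['.', '.'] <:+: (c :: t)) : md (some c) t = t := by
  induction t generalizing c with
  | nil => rfl
  | cons d t2 ih =>
    rw [md]
    have hcd : ¬ (c = '.' ∧ d = '.') := by
      rintro ⟨rfl, rfl⟩
      exact h ⟨[], t2, rfl⟩
    have hnd : ¬ ['.', '.'] <:+: (d :: t2) := by
      rintro ⟨u, v, huv⟩
      exact h ⟨c :: u, v, by simp [← huv]⟩
    have : (d == '.' && some c == some '.') = false := by
      rcases Bool.eq_false_or_eq_true (d == '.') with h1 | h1
      · have hd : d = '.' := by simpa using h1
        have hc2 : ¬ c = '.' := fun hc2 => hcd ⟨hc2, hd⟩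
        simp [hd, hc2]
      · simp [h1]
    rw [this]
    simp only [Bool.false_eq_true, reduceIte]
    rw [ih d hnd]

theorem md_of_no_dotdot (l : List Char) (h : ¬ ['.', '.'] <:+: l) : md none l = l := by
  cases l with
  | nil => rfl
  | cons c t =>
    rw [md]
    have : (c == '.' && (none : Option Char) == some '.') = false := by simp
    rw [this]
    simp only [Bool.false_eq_true, reduceIte]
    rw [md_of_no_dotdot_aux t c h]

theorem collapseA_eq_md (l : List Char) : collapseA l = md none l := by
  fun_induction collapseA with
  | case1 s h ih =>
    rw [ih, replace_dotdot_eq_rep, md_rep]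
  | case2 s h =>
    rw [md_of_no_dotdot]
    intro hi
    exact h ((PySem.Chars.find_ne_neg_one_iff s ['.', '.']).mpr hi)

theorem keepA_eq_keepB : keepA = keepB := by
  funext c
  unfold keepA keepB
  congr 1
  rcases h : PySem.Chars.isIn [c] ['-', '_', '.'] with _ | _
  · rw [PySem.Chars.isIn_eq_false_iff] at h
    simp only [List.singleton_infix_iff] at h
    simp_all
  · rw [PySem.Chars.isIn_iff_infix] at h
    simp only [List.singleton_infix_iff] at h
    simp_all

theorem stripLeadA_eq (l : List Char) :
    stripLeadA l = if l.dropWhile (· == '.') = [] then ['a'] else l.dropWhile (· == '.') := by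
  induction l with
  | nil => simp [stripLeadA]
  | cons c cs ih =>
    rw [stripLeadA]
    by_cases hc : c = '.'
    · subst hc; rw [if_pos rfl, ih]; simp
    · rw [if_neg hc]
      simp [List.dropWhile_cons, hc]

theorem stripTrailA_eq (l : List Char) :
    stripTrailA l =
      if l.reverse.dropWhile (· == '.') = [] then ['a']
      else (l.reverse.dropWhile (· == '.')).reverse := by
  rcases l.eq_nil_or_concat' with rfl | ⟨xs, c, rfl⟩
  · rw [stripTrailA]; decide
  · have hg : PySem.List.pyGet? (xs ++ [c]) (-1) = some c := by
      rw [PySem.List.pyGet?_neg_one]; simp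
    rw [stripTrailA]
    split
    · rename_i c' hc'
      rw [hg] at hc'; injection hc' with hcc; subst hcc
      by_cases hc : c = '.'
      · subst hc
        rw [if_pos rfl, PySem.List.slice_to_neg_one]
        simp only [List.dropLast_concat]
        rw [stripTrailA_eq xs]
        simp [List.dropWhile_cons]
      · rw [if_neg hc]
        simp [List.dropWhile_cons, hc]
    · rename_i hnone
      rw [hg] at hnone; cases hnone
termination_by l.length
decreasing_by subst_vars; simp

theorem contains_dot_eq (c : Char) : (['.'].contains c) = (c == '.') := by
  simp only [List.contains_cons, List.contains_nil, Bool.or_false]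

theorem stripChars_dot (l : List Char) :
    PySem.Chars.stripChars l ['.'] =
      ((l.dropWhile (· == '.')).reverse.dropWhile (· == '.')).reverse := by
  rw [PySem.Chars.stripChars]
  have hp : (fun c : Char => List.contains ['.'] c) = (· == '.') := by
    funext c; exact contains_dot_eq c
  rw [hp]

theorem strip_eq (l : List Char) :
    stripTrailA (stripLeadA l) =
      (if PySem.Chars.stripChars l ['.'] = [] then ['a'] else PySem.Chars.stripChars l ['.']) := by
  rw [stripLeadA_eq, stripChars_dot]
  by_cases h0 : l.dropWhile (· == '.') = []
  · rw [if_pos h0, h0]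
    rw [stripTrailA_eq]
    simp
  · rw [if_neg h0, stripTrailA_eq]
    obtain ⟨c, cs, hx⟩ : ∃ c cs, l.dropWhile (· == '.') = c :: cs :=
      List.exists_cons_of_ne_nil h0
    have hc : ¬ (c == '.') = true := by
      have := List.head_dropWhile_not (p := (· == '.')) (l := l) (by simp [h0])
      simpa [hx] using this
    have hmem : c ∈ (l.dropWhile (· == '.')).reverse := by simp [hx]
    have h1 : (l.dropWhile (· == '.')).reverse.dropWhile (· == '.') ≠ [] := by
      intro hnil
      rw [List.dropWhile_eq_nil_iff] at hnil
      exact hc (hnil c hmem)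
    rw [if_neg h1, if_neg (by simpa using h1)]

theorem strip_ne_nil (l : List Char) : stripTrailA (stripLeadA l) ≠ [] := by
  rw [strip_eq]
  split
  · simp
  · assumption

theorem strip_last_ne_dot (l : List Char) (c : Char)
    (h : (stripTrailA (stripLeadA l)).getLast? = some c) : c ≠ '.' := by
  rw [strip_eq] at h
  split at h
  · simp at h; subst h; decide
  · rename_i hne
    rw [stripChars_dot] at h hne
    set Y := (l.dropWhile (· == '.')).reverse.dropWhile (· == '.') with hY
    have hY0 : Y ≠ [] := by simpa using hne
    obtain ⟨d, ds, hYd⟩ := List.exists_cons_of_ne_nil hY0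
    have hne2 : (l.dropWhile (· == '.')).reverse.dropWhile (· == '.') ≠ [] := by
      rw [← hY]; exact hY0
    have hdd : ¬ (d == '.') = true := by
      have := List.head_dropWhile_not (p := (· == '.'))
        (l := (l.dropWhile (· == '.')).reverse) hne2
      simpa [← hY, hYd] using this
    rw [List.getLast?_reverse, hYd] at h
    simp at h
    subst_vars
    intro hcd
    exact hdd (by simp [hcd])

theorem suffix_dot_iff (l : List Char) (c : Char) : [c] <:+ l ↔ l.getLast? = some c := by
  rcases l.eq_nil_or_concat' with rfl | ⟨xs, d, rfl⟩
  · simp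
  · constructor
    · rintro ⟨u, hu⟩
      have := congrArg List.getLast? hu
      simp at this
      simp [this]
    · intro h
      simp at h
      subst_vars
      exact ⟨xs, rfl⟩

theorem padA_eq (l : List Char) (c : Char) (h : l.getLast? = some c) :
    padA l = l ++ List.replicate (3 - l.length) c := by
  by_cases h2 : l.length ≤ 2
  · rw [padA, dif_pos h2, PySem.List.pyGet?_neg_one, h]
    have hrec := padA_eq (l ++ [c]) c (by simp)
    have heq : l ++ [c] ++ List.replicate (3 - (l ++ [c]).length) c
        = l ++ List.replicate (3 - l.length) c := by
      have hlen : 3 - l.length = (3 - (l ++ [c]).length) + 1 := by simp; omega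
      rw [List.append_assoc, hlen]
      congr 1
    exact hrec.trans heq
  · rw [padA, dif_neg h2]
    have : 3 - l.length = 0 := by omega
    simp [this]
termination_by 3 - l.length
decreasing_by simp; omega

theorem slice_fifteen (l : List Char) : PySem.List.slice l none (some 15) = l.take 15 := by
  simp [PySem.List.slice, PySem.List.clampIdx]

set_option maxHeartbeats 1000000 in
theorem solution_eq_alt (new_id : String) : solution new_id = solution_alt new_id := by
  unfold solution solution_alt
  dsimp only
  -- stage 1/2: A's filter fold and B's one-pass fold
  set L := (PySem.Str.lower new_id).toList with hL
  have hA2 : L.foldl (fun ans c => if keepA c then ans ++ [c] else ans) [] = L.filter keepB := by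
    rw [keepA_eq_keepB]
    simpa using PySem.List.foldl_append_if keepB id L []
  have hB2 : L.foldl
      (fun acc c =>
        if keepB c then
          if c == '.' && acc.getLast? == some '.' then acc else acc ++ [c]
        else acc) [] = md none (L.filter keepB) := by
    rw [← List.foldl_filter
      (p := keepB)
      (f := fun acc c => if c == '.' && acc.getLast? == some '.' then acc else acc ++ [c])]
    rw [bfold_eq]
    rfl
  rw [hA2, hB2, collapseA_eq_md]
  -- stage 3/4/5: strip
  rw [strip_eq]
  set r := (if PySem.Chars.stripChars (md none (L.filter keepB)) ['.'] = [] then ['a']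
    else PySem.Chars.stripChars (md none (L.filter keepB)) ['.']) with hr
  have hrs : r = stripTrailA (stripLeadA (md none (L.filter keepB))) := by
    rw [strip_eq]
  have hrne : r ≠ [] := by rw [hrs]; exact strip_ne_nil _
  -- stage 6: truncation
  have h6 : (if r.length ≥ 16 then PySem.List.slice r none (some 15) else r)
      = PySem.List.slice r none (some 15) := by
    split
    · rfl
    · rw [slice_fifteen, List.take_of_length_le (by omega)]
  rw [h6]
  set t := PySem.List.slice r none (some 15) with ht
  have htne : t ≠ [] := by
    rw [ht, slice_fifteen]
    simpa [List.take_eq_nil_iff] using hrne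
  obtain ⟨d, hd⟩ : ∃ d, t.getLast? = some d := by
    cases h0 : t.getLast? with
    | none => exact absurd (List.getLast?_eq_none_iff.mp h0) htne
    | some d => exact ⟨d, rfl⟩
  -- stage 6b: single trailing-dot removal
  have hmatch : PySem.List.pyGet? t (-1) = some d := by
    rw [PySem.List.pyGet?_neg_one, hd]
  rw [hmatch]
  have hends : PySem.Chars.endswith t ['.'] = decide (d = '.') := by
    rcases eq_or_ne d '.' with rfl | hne
    · simp only [decide_true]
      exact (PySem.Chars.endswith_iff t ['.']).mpr ((suffix_dot_iff t '.').mpr hd)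
    · have hns : PySem.Chars.endswith t ['.'] = false := by
        rcases hE : PySem.Chars.endswith t ['.'] with _ | _
        · rfl
        · exfalso
          have hsuf := (PySem.Chars.endswith_iff t ['.']).mp hE
          have h2 := (suffix_dot_iff t '.').mp hsuf
          rw [hd] at h2; injection h2 with h'
          exact hne h'
      rw [hns]
      exact (decide_eq_false hne).symm
  rw [hends]
  by_cases hdd : d = '.'
  · subst hdd
    dsimp only
    rw [if_pos rfl, if_pos (by decide : (decide (('.' : Char) = '.') = true))]
    -- final stage: pad
    set u := PySem.List.slice t none (some (-1)) with hu
    have hu' : u = t.dropLast := by rw [hu, PySem.List.slice_to_neg_one]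
    have hulen : u ≠ [] := by
      -- t ends in '.', but r's last char is never '.', so r was truncated: |t| = 15
      have hrlast : ∀ c, r.getLast? = some c → c ≠ '.' := by
        intro c hc
        exact strip_last_ne_dot _ c (by rw [← hrs]; exact hc)
      have hlong : 16 ≤ r.length := by
        by_contra hlt
        have : t = r := by
          rw [ht, slice_fifteen, List.take_of_length_le (by omega)]
        exact hrlast '.' (by rw [← this, hd]) rfl
      have : t.length = 15 := by
        rw [ht, slice_fifteen, List.length_take]
        omega
      rw [hu']
      have : t.dropLast.length = 14 := by rw [List.length_dropLast, this]
      intro h0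
      rw [h0] at this
      simp at this
    obtain ⟨e, he⟩ : ∃ e, u.getLast? = some e := by
      cases h0 : u.getLast? with
      | none => exact absurd (List.getLast?_eq_none_iff.mp h0) hulen
      | some e => exact ⟨e, rfl⟩
    rw [padA_eq u e he, PySem.List.pyGet?_neg_one, he]
  · dsimp only
    rw [if_neg hdd, if_neg (by simp [hdd] : ¬ (decide (d = '.') = true))]
    rw [padA_eq t d hd, PySem.List.pyGet?_neg_one, hd]

-- ===== VERDICT (by name: the statement is the Claim_ definition above) =====
theorem solution_spec : Claim_equal_solution := by
  intro new_id _
  unfold Spec_solution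
  exact solution_eq_alt new_id
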